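-- pv_equiv track=rewrite | github.com/rvinas/adversarial-gene-expression | src/data_pipeline.py | split_replicates
-- ===== SOURCE A (Python) =====
-- def split_replicates(sample_names, split_point=-1):
--     """
--     Splits sample_names into 2 sets. The first set contains replicates 1..split_point
--     and the second has replicates split_point+1..infinity.
--     :param sample_names: list of sample names
--     :param split_point: where to make the split. Set split_point=-1 to include the last replicate
--                         in the second set
--     :return: indices of first and second subset of samples, respectively.
--     """
--     indices_first = []
--     indices_second = []
--     repl_ant = -1
--     for i, name in enumerate(sample_names):
--         repl_nb = int(name.split('_')[-1][1:])
--         if split_point == -1: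
--             if repl_ant != -1:
--                 if repl_ant >= repl_nb:
--                     indices_second.append(i - 1)
--                 else:
--                     indices_first.append(i - 1)
--             repl_ant = repl_nb
--         elif repl_nb <= split_point:
--             indices_first.append(i)
--         else:
--             indices_second.append(i)
--
--     # Last replicate goes to second set if split_point=-1
--     if split_point == -1:
--         indices_second.append(len(sample_names) - 1)
--
--     assert len(set(indices_first + indices_second)) == len(sample_names)
--     return indices_first, indices_second
-- ===== SOURCE B (Python) =====
-- def split_replicates(sample_names, split_point=-1):
--     repls = [int(name.split('_')[-1][1:]) for name in sample_names]
--     n = len(repls)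
--     if split_point != -1:
--         indices_first = [i for i, r in enumerate(repls) if r <= split_point]
--         indices_second = [i for i, r in enumerate(repls) if r > split_point]
--     else:
--         # cut the sequence into maximal strictly increasing runs; within each
--         # run all but the last index go to the first set, each run's last
--         # index (in particular the final one) goes to the second set
--         cuts = [i for i, (x, y) in enumerate(zip(repls, repls[1:]), 1) if x >= y]
--         bounds = [0] + cuts + [n]
--         indices_first = []
--         indices_second = []
--         for a, b in zip(bounds, bounds[1:]):
--             indices_first.extend(range(a, b - 1))
--             indices_second.append(b - 1)
--     assert len(set(indices_first + indices_second)) == len(sample_names)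
--     return indices_first, indices_second
-- ===== Notes on version B (the rewrite author's own statement) =====
-- stated objective: alternative
-- what changed: B parses all replicate numbers first, then for split_point == -1 segments the sequence into maximal strictly increasing runs via an explicit boundary list (bounds = [0] + cuts + [n]) and emits each run's interior indices to the first set and each run's end index to the second, instead of A's single pass with a backward repl_ant sentinel; for split_point != -1 it uses two staged comprehensions over the parsed list instead of A's interleaved parse-and-append loop.
import Mathlib
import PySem

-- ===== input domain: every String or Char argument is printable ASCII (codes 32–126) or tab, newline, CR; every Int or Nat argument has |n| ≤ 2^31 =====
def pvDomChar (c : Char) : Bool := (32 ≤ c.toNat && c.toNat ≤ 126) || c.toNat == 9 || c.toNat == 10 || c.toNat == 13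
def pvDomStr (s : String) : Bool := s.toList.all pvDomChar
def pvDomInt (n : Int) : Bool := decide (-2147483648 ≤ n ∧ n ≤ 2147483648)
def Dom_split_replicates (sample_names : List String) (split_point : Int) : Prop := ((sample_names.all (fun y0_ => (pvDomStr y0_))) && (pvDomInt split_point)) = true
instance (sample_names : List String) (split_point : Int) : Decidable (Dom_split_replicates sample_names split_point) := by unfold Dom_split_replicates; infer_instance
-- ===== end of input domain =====

-- B parses all replicate numbers first, then (for split_point = -1) segments the sequence into
-- maximal strictly increasing runs via an explicit boundary list and emits per-run index ranges,
-- replacing A's single pass with a backward repl_ant sentinel: an alternative algorithm, same cost.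


-- shared one-line parse of both Pythons: int(name.split('_')[-1][1:]); none = ValueError
def parseRepl (name : String) : Option Int :=
  match PySem.Str.split? name "_" with
  | none => none  -- unreachable: the separator "_" is nonempty
  | some parts =>
    match PySem.List.pyGet? parts (-1) with
    | none => none  -- unreachable: split always yields at least one piece
    | some last => PySem.Int.ofStr? (PySem.Str.slice last (some 1) none)

-- ===== PORT A =====
-- the for-loop of A: state (indices_first, indices_second, repl_ant); none = ValueError from int()
def splitALoop (names : List String) (i sp : Int) (f s : List Int) (repl_ant : Int) :
    Option (List Int × List Int) :=
  match names with
  | [] => some (f, s)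
  | name :: rest =>
    match parseRepl name with
    | none => none
    | some repl_nb =>
      if sp = -1 then
        if repl_ant ≠ -1 then
          if repl_ant ≥ repl_nb then splitALoop rest (i+1) sp f (s ++ [i-1]) repl_nb
          else splitALoop rest (i+1) sp (f ++ [i-1]) s repl_nb
        else splitALoop rest (i+1) sp f s repl_nb
      else if repl_nb ≤ sp then splitALoop rest (i+1) sp (f ++ [i]) s repl_ant
      else splitALoop rest (i+1) sp f (s ++ [i]) repl_ant

def split_replicates (sample_names : List String) (split_point : Int) : List Int × List Int :=
  match splitALoop sample_names 0 split_point [] [] (-1) with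
  | none => ([], [])  -- int() raised ValueError: outside Pre_
  | some (f, s) =>
    let s' := if split_point = -1 then s ++ [(sample_names.length : Int) - 1] else s
    -- assert len(set(indices_first + indices_second)) == len(sample_names); failure outside Pre_
    if (PySem.Set.ofList (f ++ s')).length = sample_names.length then (f, s') else ([], [])

-- ===== PORT B =====
-- the list comprehension: repls = [int(name.split('_')[-1][1:]) for name in sample_names]
def parseAll (names : List String) : Option (List Int) :=
  match names with
  | [] => some []
  | n :: rest =>
    match parseRepl n, parseAll rest with
    | some r, some rs => some (r :: rs)
    | _, _ => none

-- [i for i, r in enumerate(repls) if p(r)]  (the two comprehensions of the split_point != -1 branch)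
def enumIdx (repls : List Int) (i : Int) (p : Int → Bool) : List Int :=
  match repls with
  | [] => []
  | r :: rest => if p r then i :: enumIdx rest (i+1) p else enumIdx rest (i+1) p

-- cuts = [i for i, (x, y) in enumerate(zip(repls, repls[1:]), 1) if x >= y]
def cutIdx (pairs : List (Int × Int)) (i : Int) : List Int :=
  match pairs with
  | [] => []
  | (x, y) :: rest => if x ≥ y then i :: cutIdx rest (i+1) else cutIdx rest (i+1)

-- for a, b in zip(bounds, bounds[1:]): first += range(a, b-1); second += [b-1]
def emitRuns (pairs : List (Int × Int)) (f s : List Int) : List Int × List Int :=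
  match pairs with
  | [] => (f, s)
  | (a, b) :: rest => emitRuns rest (f ++ PySem.List.pyRange a (b-1) 1) (s ++ [b-1])

def split_replicates_alt (sample_names : List String) (split_point : Int) : List Int × List Int :=
  match parseAll sample_names with
  | none => ([], [])  -- int() raised ValueError: outside Pre_
  | some repls =>
    let n : Int := repls.length
    let fs :=
      if split_point ≠ -1 then
        (enumIdx repls 0 (fun r => r ≤ split_point), enumIdx repls 0 (fun r => split_point < r))
      else
        let cuts := cutIdx (repls.zip (PySem.List.slice repls (some 1) none)) 1
        let bounds := 0 :: cuts ++ [n]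
        emitRuns (bounds.zip (PySem.List.slice bounds (some 1) none)) [] []
    -- assert len(set(indices_first + indices_second)) == len(sample_names); failure outside Pre_
    if (PySem.Set.ofList (fs.1 ++ fs.2)).length = sample_names.length then fs else ([], [])

-- ===== PRECONDITION & SPEC =====
-- Pre_ excludes exactly the inputs where A raises: a name int() cannot parse (ValueError), and
-- for split_point = -1 the empty list and a replicate number -1 before the last position
-- (A's repl_ant sentinel then skips an index and the assert raises AssertionError).
def Pre_split_replicates (sample_names : List String) (split_point : Int) : Prop :=
  (∀ name ∈ sample_names, (parseRepl name).isSome) ∧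
  (split_point = -1 → sample_names ≠ [] ∧ ∀ name ∈ sample_names.dropLast, parseRepl name ≠ some (-1))
instance (sample_names : List String) (split_point : Int) : Decidable (Pre_split_replicates sample_names split_point) := by unfold Pre_split_replicates; infer_instance
def pvWitness_split_replicates : List String × Int := (["s_r1", "s_r2"], -1)

def Spec_split_replicates (sample_names : List String) (split_point : Int) (out : List Int × List Int) : Prop := out = split_replicates_alt sample_names split_point
instance (sample_names : List String) (split_point : Int) (out : List Int × List Int) : Decidable (Spec_split_replicates sample_names split_point out) := by unfold Spec_split_replicates; infer_instance

-- ===== CLAIM (what is proved, stated in full; the proofs are below) =====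
def Claim_equal_split_replicates : Prop := ∀ (sample_names : List String) (split_point : Int), Dom_split_replicates sample_names split_point → Pre_split_replicates sample_names split_point → Spec_split_replicates sample_names split_point (split_replicates sample_names split_point)

-- ===== LEMMAS AND PROOFS =====

-- proof-side helpers: the adjacent-pair indices that land in the first / second set
def ltIdx (pairs : List (Int × Int)) (i : Int) : List Int :=
  match pairs with
  | [] => []
  | (x, y) :: rest => if x ≥ y then ltIdx rest (i+1) else i :: ltIdx rest (i+1)

def geIdx (pairs : List (Int × Int)) (i : Int) : List Int :=
  match pairs with
  | [] => []
  | (x, y) :: rest => if x ≥ y then i :: geIdx rest (i+1) else geIdx rest (i+1)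

-- A's loop in the split_point = -1 mode, re-expressed over adjacent pairs (proof intermediate)
def adjIdx (pairs : List (Int × Int)) (i : Int) (f s : List Int) : List Int × List Int :=
  match pairs with
  | [] => (f, s)
  | (a, b) :: rest =>
    if a ≥ b then adjIdx rest (i+1) f (s ++ [i]) else adjIdx rest (i+1) (f ++ [i]) s

theorem parseAll_of_isSome : ∀ (names : List String),
    (∀ name ∈ names, (parseRepl name).isSome) → ∃ repls, parseAll names = some repls
  | [], _ => ⟨[], rfl⟩
  | n :: rest, h => by
    obtain ⟨r, hr⟩ := Option.isSome_iff_exists.mp (h n (by simp))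
    obtain ⟨rs, hrs⟩ := parseAll_of_isSome rest (fun x hx => h x (by simp [hx]))
    exact ⟨r :: rs, by simp [parseAll, hr, hrs]⟩

theorem parseAll_length (names : List String) (repls : List Int)
    (hp : parseAll names = some repls) : repls.length = names.length := by
  induction names generalizing repls with
  | nil => simp [parseAll] at hp; subst hp; simp
  | cons n rest ih =>
    cases hr : parseRepl n with
    | none => simp [parseAll, hr] at hp
    | some r =>
      cases hrs : parseAll rest with
      | none => simp [parseAll, hr, hrs] at hp
      | some rs =>
        simp [parseAll, hr, hrs] at hp
        subst hp
        simp [ih rs hrs]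

theorem parseAll_mem (names : List String) (repls : List Int) (x : Int)
    (hp : parseAll names = some repls) (hx : x ∈ repls) :
    ∃ nm ∈ names, parseRepl nm = some x := by
  induction names generalizing repls with
  | nil => simp [parseAll] at hp; subst hp; simp at hx
  | cons n rest ih =>
    cases hr : parseRepl n with
    | none => simp [parseAll, hr] at hp
    | some r =>
      cases hrs : parseAll rest with
      | none => simp [parseAll, hr, hrs] at hp
      | some rs =>
        simp [parseAll, hr, hrs] at hp
        subst hp
        rcases List.mem_cons.mp hx with h | h
        · exact ⟨n, by simp, h ▸ hr⟩
        · obtain ⟨nm, hnm, he⟩ := ih rs hrs h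
          exact ⟨nm, by simp [hnm], he⟩

theorem parseAll_dropLast (names : List String) (repls : List Int)
    (hp : parseAll names = some repls) :
    parseAll names.dropLast = some repls.dropLast := by
  induction names generalizing repls with
  | nil => simp [parseAll] at hp; subst hp; simp [parseAll]
  | cons n rest ih =>
    cases hr : parseRepl n with
    | none => simp [parseAll, hr] at hp
    | some r =>
      cases hrs : parseAll rest with
      | none => simp [parseAll, hr, hrs] at hp
      | some rs =>
        simp [parseAll, hr, hrs] at hp
        subst hp
        cases rest with
        | nil => simp [parseAll] at hrs; subst hrs; simp [parseAll]
        | cons m rest' =>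
          have hrs' := ih rs hrs
          have hlen : rs ≠ [] := by
            intro hnil; subst hnil
            cases hm : parseRepl m <;> cases hrest' : parseAll rest' <;>
              simp [parseAll, hm, hrest'] at hrs
          rw [List.dropLast_cons_of_ne_nil (by simp), List.dropLast_cons_of_ne_nil hlen]
          simp [parseAll, hr, hrs']

theorem parseAll_dropLast_ne (names : List String) (repls : List Int)
    (hp : parseAll names = some repls)
    (h : ∀ name ∈ names.dropLast, parseRepl name ≠ some (-1)) :
    ∀ x ∈ repls.dropLast, x ≠ -1 := by
  intro x hx hxeq
  subst hxeq
  obtain ⟨nm, hnm, he⟩ := parseAll_mem names.dropLast repls.dropLast (-1)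
    (parseAll_dropLast names repls hp) hx
  exact h nm hnm he

-- A's loop, split_point ≠ -1 mode, equals the two staged index comprehensions of B
theorem splitALoop_enumIdx (names : List String) (repls : List Int) (sp : Int)
    (hsp : sp ≠ -1) (hp : parseAll names = some repls) :
    ∀ (i prev : Int) (f s : List Int),
      splitALoop names i sp f s prev =
        some (f ++ enumIdx repls i (fun r => r ≤ sp), s ++ enumIdx repls i (fun r => sp < r)) := by
  induction names generalizing repls with
  | nil =>
    intro i prev f s
    simp [parseAll] at hp; subst hp
    simp [splitALoop, enumIdx]
  | cons n rest ih =>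
    intro i prev f s
    cases hr : parseRepl n with
    | none => simp [parseAll, hr] at hp
    | some r =>
      cases hrs : parseAll rest with
      | none => simp [parseAll, hr, hrs] at hp
      | some rs =>
        simp [parseAll, hr, hrs] at hp
        subst hp
        by_cases hc : r ≤ sp <;>
          simp [splitALoop, hr, hsp, enumIdx, hc, ih rs hrs, show ¬ sp < r ↔ r ≤ sp from not_lt, List.append_assoc]

-- A's loop, split_point = -1 mode, re-expressed over adjacent pairs
theorem splitALoop_adjIdx (names : List String) (repls : List Int) (prev : Int)
    (hp : parseAll names = some repls)
    (hne : ∀ x ∈ (prev :: repls).dropLast, x ≠ -1) :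
    ∀ (i : Int) (f s : List Int),
      splitALoop names i (-1) f s prev = some (adjIdx ((prev :: repls).zip repls) (i-1) f s) := by
  induction names generalizing repls prev with
  | nil =>
    intro i f s
    simp [parseAll] at hp; subst hp
    simp [splitALoop, adjIdx]
  | cons n rest ih =>
    intro i f s
    cases hr : parseRepl n with
    | none => simp [parseAll, hr] at hp
    | some r =>
      cases hrs : parseAll rest with
      | none => simp [parseAll, hr, hrs] at hp
      | some rs =>
        simp [parseAll, hr, hrs] at hp
        subst hp
        have hprev : prev ≠ -1 := hne prev (by rw [List.dropLast_cons_of_ne_nil (by simp)]; simp)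
        have hne' : ∀ x ∈ (r :: rs).dropLast, x ≠ -1 := by
          intro x hx
          exact hne x (by rw [List.dropLast_cons_of_ne_nil (by simp)]; simp [hx])
        have ihx := ih rs r hrs hne' (i+1)
        by_cases hc : prev ≥ r <;>
          simp [splitALoop, hr, hprev, hc, adjIdx, ihx, show i + 1 - 1 = i - 1 + 1 by ring]

-- adjIdx characterised by the two index filters
theorem adjIdx_spec (pairs : List (Int × Int)) :
    ∀ (i : Int) (f s : List Int),
      adjIdx pairs i f s = (f ++ ltIdx pairs i, s ++ geIdx pairs i) := by
  induction pairs with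
  | nil => intro i f s; simp [adjIdx, ltIdx, geIdx]
  | cons p rest ih =>
    intro i f s
    obtain ⟨x, y⟩ := p
    by_cases hc : x ≥ y <;> simp [adjIdx, ltIdx, geIdx, hc, ih, List.append_assoc]

-- THE CRUX: emitting the runs delimited by the cut list reproduces the two index filters
theorem emitRuns_spec (pairs : List (Int × Int)) :
    ∀ (i a : Int) (f s : List Int), a ≤ i →
      emitRuns ((a :: (cutIdx pairs (i+1) ++ [i + 1 + (pairs.length : Int)])).zip
          (cutIdx pairs (i+1) ++ [i + 1 + (pairs.length : Int)])) f s
        = (f ++ PySem.List.pyRange a i 1 ++ ltIdx pairs i,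
           s ++ geIdx pairs i ++ [i + (pairs.length : Int)]) := by
  induction pairs with
  | nil =>
    intro i a f s ha
    simp [cutIdx, ltIdx, geIdx, emitRuns]
  | cons p rest ih =>
    intro i a f s ha
    obtain ⟨x, y⟩ := p
    by_cases hc : x ≥ y
    · have key := ih (i+1) (i+1) (f ++ PySem.List.pyRange a i 1) (s ++ [i]) le_rfl
      simp only [cutIdx, ltIdx, geIdx, hc, if_pos, List.length_cons] at key ⊢
      have harith : (i + 1) + 1 + (rest.length : Int) = i + 1 + ((rest.length : Int) + 1) := by ring
      have harith2 : (i + 1) + (rest.length : Int) = i + ((rest.length : Int) + 1) := by ring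
      rw [harith, harith2] at key
      simp only [List.cons_append, List.zip_cons_cons, emitRuns]
      rw [show i + 1 - 1 = i from by ring] at *
      simpa [List.append_assoc, PySem.List.pyRange_one_eq_nil (le_refl (i+1))] using key
    · have key := ih (i+1) a f s (by omega)
      simp only [cutIdx, ltIdx, geIdx, hc, List.length_cons] at key ⊢
      have harith : (i + 1) + 1 + (rest.length : Int) = i + 1 + ((rest.length : Int) + 1) := by ring
      have harith2 : (i + 1) + (rest.length : Int) = i + ((rest.length : Int) + 1) := by ring
      rw [harith, harith2] at key
      push_cast
      rw [key, PySem.List.pyRange_one_succ_right ha]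
      simp [List.append_assoc]

-- ===== VERDICT (by name: the statement is the Claim_ definition above) =====
theorem split_replicates_spec : Claim_equal_split_replicates := by
  intro names sp _ hpre
  obtain ⟨hsome, hneg⟩ := hpre
  obtain ⟨repls, hrep⟩ := parseAll_of_isSome names hsome
  have hlen := parseAll_length names repls hrep
  show _ = split_replicates_alt names sp
  by_cases hsp : sp = -1
  · subst hsp
    obtain ⟨hnil, hdrop⟩ := hneg rfl
    cases names with
    | nil => exact absurd rfl hnil
    | cons n0 rest =>
      cases hr0 : parseRepl n0 with
      | none => simpa [hr0] using hsome n0 (by simp)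
      | some r0 =>
        cases hrs : parseAll rest with
        | none => simp [parseAll, hr0, hrs] at hrep
        | some rs =>
          simp [parseAll, hr0, hrs] at hrep
          subst hrep
          have hne := parseAll_dropLast_ne (n0 :: rest) (r0 :: rs) (by simp [parseAll, hr0, hrs]) hdrop
          have hlen' : rs.length = rest.length := by simpa using hlen
          unfold split_replicates split_replicates_alt
          rw [show parseAll (n0 :: rest) = some (r0 :: rs) from by simp [parseAll, hr0, hrs]]
          simp only [splitALoop, hr0, reduceIte]
          rw [show (0 : Int) + 1 = 1 from rfl, splitALoop_adjIdx rest rs r0 hrs hne 1 [] []]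
          have hzl : ((r0 :: rs).zip rs).length = rs.length := by
            simp [List.length_zip]
          have hB : emitRuns ((0 :: (cutIdx ((r0 :: rs).zip rs) 1 ++ [((r0 :: rs).length : Int)])).zip
                (cutIdx ((r0 :: rs).zip rs) 1 ++ [((r0 :: rs).length : Int)])) [] []
              = (ltIdx ((r0 :: rs).zip rs) 0,
                 geIdx ((r0 :: rs).zip rs) 0 ++ [((r0 :: rs).length : Int) - 1]) := by
            have h := emitRuns_spec ((r0 :: rs).zip rs) 0 0 [] [] le_rfl
            rw [show (0:Int) + 1 = 1 from rfl,
              show (1:Int) + ((((r0 :: rs).zip rs).length : Nat) : Int) = ((r0 :: rs).length : Int) from by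
                simp only [hzl, List.length_cons]; push_cast; ring,
              show (0:Int) + ((((r0 :: rs).zip rs).length : Nat) : Int) = ((r0 :: rs).length : Int) - 1 from by
                simp only [hzl, List.length_cons]; push_cast; ring] at h
            simpa [PySem.List.pyRange_one_eq_nil (le_refl (0:Int))] using h
          simp only [PySem.List.slice_from_one, List.cons_append, List.tail_cons]
          rw [hB]
          simp [adjIdx_spec, hlen']
  · unfold split_replicates split_replicates_alt
    rw [splitALoop_enumIdx names repls sp hsp hrep 0 (-1) [] [], hrep]
    simp [hsp]
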